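-- pv_equiv track=rewrite | github.com/yastn/yastn | yastn/tensor/_auxiliary.py | _join_contiguous_slices
-- ===== SOURCE A (Python) =====
-- def _join_contiguous_slices(slcs_a, slcs_b):
--     if not slcs_a:
--         return ()
--     meta = []
--     tmp_a = slcs_a[0]
--     tmp_b = slcs_b[0]
--     for sl_a, sl_b in zip(slcs_a[1:], slcs_b[1:]):
--         if tmp_a[1] == sl_a[0] and tmp_b[1] == sl_b[0]:
--             tmp_a = (tmp_a[0], sl_a[1])
--             tmp_b = (tmp_b[0], sl_b[1])
--         else:
--             meta.append((tmp_a, tmp_b))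
--             tmp_a = sl_a
--             tmp_b = sl_b
--     meta.append((tmp_a, tmp_b))
--     return tuple(meta)
-- ===== SOURCE B (Python) =====
-- def _join_contiguous_slices(slcs_a, slcs_b):
--     out = []
--     for sl_a, sl_b in reversed(list(zip(slcs_a, slcs_b))):
--         if out and sl_a[1] == out[0][0][0] and sl_b[1] == out[0][1][0]:
--             out[0] = ((sl_a[0], out[0][0][1]), (sl_b[0], out[0][1][1]))
--         else:
--             out.insert(0, (sl_a, sl_b))
--     return tuple(out)
-- ===== Notes on version B (the rewrite author's own statement) =====
-- stated objective: alternative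
-- what changed: B builds the result back-to-front: a single right-to-left pass merges each slice pair into the head of the output being built, instead of A's left-to-right loop carrying a pending run in accumulator variables.
import Mathlib
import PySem

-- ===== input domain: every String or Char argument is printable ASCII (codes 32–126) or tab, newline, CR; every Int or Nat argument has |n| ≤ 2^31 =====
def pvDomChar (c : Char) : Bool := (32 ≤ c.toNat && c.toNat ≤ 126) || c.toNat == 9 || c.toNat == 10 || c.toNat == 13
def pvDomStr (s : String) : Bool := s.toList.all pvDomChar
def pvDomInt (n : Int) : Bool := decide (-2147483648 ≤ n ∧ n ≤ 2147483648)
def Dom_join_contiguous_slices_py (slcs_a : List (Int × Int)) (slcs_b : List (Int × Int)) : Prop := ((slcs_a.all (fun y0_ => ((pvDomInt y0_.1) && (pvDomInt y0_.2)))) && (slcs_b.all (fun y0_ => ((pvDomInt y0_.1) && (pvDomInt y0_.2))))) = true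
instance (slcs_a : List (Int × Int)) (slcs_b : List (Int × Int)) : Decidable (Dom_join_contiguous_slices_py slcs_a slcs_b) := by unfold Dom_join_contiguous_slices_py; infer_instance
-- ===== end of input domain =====

-- B builds the result back-to-front (one right-to-left pass merging into the head of the output),
-- instead of A's left-to-right loop carrying a pending run; proved equal wherever A returns.

-- ===== PORT A =====
-- the for-loop over zip(slcs_a[1:], slcs_b[1:]) with state (acc, tmp_a, tmp_b)
def jcsLoop (tmp_a tmp_b : Int × Int) (acc : List ((Int × Int) × (Int × Int))) :
    List ((Int × Int) × (Int × Int)) → List ((Int × Int) × (Int × Int))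
  | [] => acc ++ [(tmp_a, tmp_b)]
  | (sl_a, sl_b) :: rest =>
    if tmp_a.2 = sl_a.1 ∧ tmp_b.2 = sl_b.1 then
      jcsLoop (tmp_a.1, sl_a.2) (tmp_b.1, sl_b.2) acc rest
    else
      jcsLoop sl_a sl_b (acc ++ [(tmp_a, tmp_b)]) rest

def join_contiguous_slices_py (slcs_a : List (Int × Int)) (slcs_b : List (Int × Int)) : List ((Int × Int) × (Int × Int)) :=
  match slcs_a, slcs_b with
  | [], _ => []
  | a0 :: as_, b0 :: bs => jcsLoop a0 b0 [] (List.zip as_ bs)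
  | _ :: _, [] => []  -- Python raises IndexError here (slcs_b[0]); excluded by Pre_

-- ===== PORT B =====
-- body of Source B's loop: merge the current pair into the head of the output built so far
def jcsAltStep (x : (Int × Int) × (Int × Int)) (out : List ((Int × Int) × (Int × Int))) :
    List ((Int × Int) × (Int × Int)) :=
  match out with
  | [] => [x]
  | h :: t =>
    if x.1.2 = h.1.1 ∧ x.2.2 = h.2.1 then ((x.1.1, h.1.2), (x.2.1, h.2.2)) :: t
    else x :: h :: t

-- the right-to-left pass over reversed(list(zip(slcs_a, slcs_b)))
def join_contiguous_slices_py_alt (slcs_a : List (Int × Int)) (slcs_b : List (Int × Int)) : List ((Int × Int) × (Int × Int)) :=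
  List.foldr jcsAltStep [] (List.zip slcs_a slcs_b)

-- ===== PRECONDITION & SPEC =====
-- Pre_ excludes exactly the inputs where A raises IndexError: nonempty slcs_a with empty slcs_b.
def Pre_join_contiguous_slices_py (slcs_a : List (Int × Int)) (slcs_b : List (Int × Int)) : Prop :=
  slcs_a = [] ∨ slcs_b ≠ []
instance (slcs_a : List (Int × Int)) (slcs_b : List (Int × Int)) : Decidable (Pre_join_contiguous_slices_py slcs_a slcs_b) := by unfold Pre_join_contiguous_slices_py; infer_instance

def pvWitness_join_contiguous_slices_py : (List (Int × Int)) × (List (Int × Int)) :=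
  ([(0, 2), (2, 5), (7, 9)], [(1, 3), (4, 6), (6, 8)])

def Spec_join_contiguous_slices_py (slcs_a : List (Int × Int)) (slcs_b : List (Int × Int)) (out : List ((Int × Int) × (Int × Int))) : Prop := out = join_contiguous_slices_py_alt slcs_a slcs_b
instance (slcs_a : List (Int × Int)) (slcs_b : List (Int × Int)) (out : List ((Int × Int) × (Int × Int))) : Decidable (Spec_join_contiguous_slices_py slcs_a slcs_b out) := by unfold Spec_join_contiguous_slices_py; infer_instance

-- ===== CLAIM (what is proved, stated in full; the proofs are below) =====
def Claim_equal_join_contiguous_slices_py : Prop := ∀ (slcs_a : List (Int × Int)) (slcs_b : List (Int × Int)), Dom_join_contiguous_slices_py slcs_a slcs_b → Pre_join_contiguous_slices_py slcs_a slcs_b → Spec_join_contiguous_slices_py slcs_a slcs_b (join_contiguous_slices_py slcs_a slcs_b)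

-- ===== LEMMAS AND PROOFS =====

-- common recursive description of the run-merging: current run + remaining pairs ↦ merged runs
def jcsRuns (x : (Int × Int) × (Int × Int)) :
    List ((Int × Int) × (Int × Int)) → List ((Int × Int) × (Int × Int))
  | [] => [x]
  | y :: rest =>
    if x.1.2 = y.1.1 ∧ x.2.2 = y.2.1 then
      jcsRuns ((x.1.1, y.1.2), (x.2.1, y.2.2)) rest
    else
      x :: jcsRuns y rest

theorem jcsLoop_eq_runs (l : List ((Int × Int) × (Int × Int))) :
    ∀ tmp_a tmp_b acc, jcsLoop tmp_a tmp_b acc l = acc ++ jcsRuns (tmp_a, tmp_b) l := by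
  induction l with
  | nil => intro ta tb acc; rfl
  | cons y rest ih =>
    intro ta tb acc
    obtain ⟨sa, sb⟩ := y
    simp only [jcsLoop, jcsRuns]
    split_ifs with h
    · exact ih _ _ acc
    · rw [ih sa sb]; simp

-- the first run emitted by the foldr starts at the first element's starting points
theorem jcsFoldr_head (l : List ((Int × Int) × (Int × Int))) :
    ∀ x, ∃ c d t, List.foldr jcsAltStep [] (x :: l) = ((x.1.1, c), (x.2.1, d)) :: t := by
  induction l with
  | nil => intro x; exact ⟨x.1.2, x.2.2, [], rfl⟩
  | cons y rest ih =>
    intro x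
    obtain ⟨c, d, t, hy⟩ := ih y
    simp only [List.foldr_cons] at hy ⊢
    rw [hy]
    simp only [jcsAltStep]
    split_ifs with h
    · exact ⟨c, d, t, rfl⟩
    · exact ⟨x.1.2, x.2.2, _, rfl⟩

-- jcsRuns depends on the current run's starting points only by pasting them onto the head
theorem jcsRuns_setFirsts (l : List ((Int × Int) × (Int × Int))) :
    ∀ c d p q p' q', jcsRuns ((p, c), (q, d)) l =
      match jcsRuns ((p', c), (q', d)) l with
      | [] => []
      | h :: t => ((p, h.1.2), (q, h.2.2)) :: t := by
  induction l with
  | nil => intro c d p q p' q'; rfl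
  | cons y rest ih =>
    intro c d p q p' q'
    simp only [jcsRuns]
    split_ifs with h
    · exact ih _ _ _ _ _ _
    · rfl

theorem jcsFoldr_eq_runs (l : List ((Int × Int) × (Int × Int))) :
    ∀ x, List.foldr jcsAltStep [] (x :: l) = jcsRuns x l := by
  induction l with
  | nil => intro x; rfl
  | cons y rest ih =>
    intro x
    have hy := ih y
    obtain ⟨c, d, t, hhd⟩ := jcsFoldr_head rest y
    simp only [List.foldr_cons] at hy hhd ⊢
    rw [hy] at hhd
    rw [hy, hhd]
    simp only [jcsAltStep, jcsRuns]
    split_ifs with h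
    · have hs := jcsRuns_setFirsts rest y.1.2 y.2.2 x.1.1 x.2.1 y.1.1 y.2.1
      rw [show ((y.1.1, y.1.2), (y.2.1, y.2.2)) = y from rfl] at hs
      rw [hs, hhd]
    · rw [hhd]

-- ===== VERDICT (by name: the statement is the Claim_ definition above) =====
theorem join_contiguous_slices_py_spec : Claim_equal_join_contiguous_slices_py := by
  intro slcs_a slcs_b _ hpre
  unfold Spec_join_contiguous_slices_py join_contiguous_slices_py join_contiguous_slices_py_alt
  match slcs_a, slcs_b with
  | [], _ => simp
  | a0 :: as_, b0 :: bs =>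
    simp only [List.zip_cons_cons]
    rw [jcsFoldr_eq_runs, jcsLoop_eq_runs]
    simp
  | _ :: _, [] => rcases hpre with h | h <;> simp at h
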